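-- pv_equiv track=rewrite | github.com/GuillaumeGACHON/TUNING_2023 | ds_to_sc.py | dicoteur
-- ===== SOURCE A (Python) =====
-- def dicoteur(liste_met,liste_sc):
--     dico={}
--     liste_reste=liste_met.copy()
--     for el in liste_met:
--         if el[-3:]=='ANM' or el[-4:]=="bias" or el[:6]=="Qt_OCE":
--             dico.update({el:el})
--             liste_reste.remove(el)
--         elif el[-3:]=='JAS' or el[-3:]=='JFM':
--             for elem in liste_sc:
--                 if elem[:-3]==el[:-3]:
--                     dico.update({el:elem})
--                     liste_reste.remove(el)
--         elif el[-8:]=="seacycle":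
--             dico.update({el:el[:-8]+"bias"})
--             liste_reste.remove(el)
--         elif el=="ENSO_amplitude" or el=="ENSO_seasonality":
--             dico.update({el:"ENSO_amplitude"})
--             liste_reste.remove(el)
--     return dico,liste_reste
-- ===== SOURCE B (Python) =====
-- def dicoteur(liste_met, liste_sc):
--     # Index liste_sc by its prefix-without-last-3 once, then one pass over liste_met.
--     sc_by_prefix = {s[:-3]: s for s in liste_sc}
--     dico = {}
--     reste = []
--     for el in liste_met:
--         if el[-3:] == 'ANM' or el[-4:] == 'bias' or el[:6] == 'Qt_OCE':
--             dico[el] = el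
--         elif el[-3:] == 'JAS' or el[-3:] == 'JFM':
--             m = sc_by_prefix.get(el[:-3])
--             if m is not None:
--                 dico[el] = m
--             else:
--                 reste.append(el)
--         elif el[-8:] == 'seacycle':
--             dico[el] = el[:-8] + 'bias'
--         elif el == 'ENSO_amplitude' or el == 'ENSO_seasonality':
--             dico[el] = 'ENSO_amplitude'
--         else:
--             reste.append(el)
--     return dico, reste
-- ===== Notes on version B (the rewrite author's own statement) =====
-- stated objective: alternative
-- what changed: Replaces the inner scan of liste_sc (and list.remove on a shrinking copy of liste_met) with a dict of liste_sc keyed by s[:-3] built once, and builds the leftover list by appending unmatched elements in a single pass.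
import Mathlib
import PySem

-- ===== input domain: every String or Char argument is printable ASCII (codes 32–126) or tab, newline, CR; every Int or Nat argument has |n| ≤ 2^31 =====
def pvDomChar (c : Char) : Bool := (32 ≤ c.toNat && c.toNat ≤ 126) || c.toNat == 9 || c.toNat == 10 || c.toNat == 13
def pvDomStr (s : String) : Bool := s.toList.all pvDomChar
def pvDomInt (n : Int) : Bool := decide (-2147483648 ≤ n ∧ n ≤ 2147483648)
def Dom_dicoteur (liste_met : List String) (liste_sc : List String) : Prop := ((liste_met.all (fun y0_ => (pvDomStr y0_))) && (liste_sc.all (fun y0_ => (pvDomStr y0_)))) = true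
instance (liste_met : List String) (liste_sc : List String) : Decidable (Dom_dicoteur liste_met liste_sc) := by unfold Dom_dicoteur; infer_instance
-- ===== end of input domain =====

-- B replaces A's inner scan of liste_sc and its remove-from-a-copy bookkeeping with a
-- prefix-indexed dict built once plus a single pass over liste_met (objective: alternative).

-- shared sub-expressions of both Pythons (branch tests and slice values), named once
def pvPref (s : String) : String := PySem.Str.slice s none (some (-3))          -- s[:-3]
def pvCondTop (el : String) : Bool :=
  PySem.Str.slice el (some (-3)) none == "ANM" || PySem.Str.slice el (some (-4)) none == "bias"
    || PySem.Str.slice el none (some 6) == "Qt_OCE"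
def pvCondJ (el : String) : Bool :=
  PySem.Str.slice el (some (-3)) none == "JAS" || PySem.Str.slice el (some (-3)) none == "JFM"
def pvCondSea (el : String) : Bool := PySem.Str.slice el (some (-8)) none == "seacycle"
def pvCondE (el : String) : Bool := el == "ENSO_amplitude" || el == "ENSO_seasonality"
def pvSeaVal (el : String) : String := PySem.Str.join "" [PySem.Str.slice el none (some (-8)), "bias"]  -- el[:-8]+"bias"

-- ===== PORT A =====
-- inner 'for elem in liste_sc' loop of A; none = the ValueError of liste_reste.remove
def stepA_inner (el : String) (st : Option (PySem.Dict String String × List String)) (elem : String) :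
    Option (PySem.Dict String String × List String) :=
  st.bind fun dr =>
    if pvPref elem == pvPref el then
      (PySem.List.remove? dr.2 el).map fun r' => (dr.1.insert el elem, r')
    else some dr

-- one iteration of A's outer loop
def stepA (liste_sc : List String) (st : Option (PySem.Dict String String × List String))
    (el : String) : Option (PySem.Dict String String × List String) :=
  st.bind fun dr =>
    if pvCondTop el then (PySem.List.remove? dr.2 el).map fun r' => (dr.1.insert el el, r')
    else if pvCondJ el then liste_sc.foldl (stepA_inner el) (some dr)
    else if pvCondSea el then (PySem.List.remove? dr.2 el).map fun r' => (dr.1.insert el (pvSeaVal el), r')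
    else if pvCondE el then (PySem.List.remove? dr.2 el).map fun r' => (dr.1.insert el "ENSO_amplitude", r')
    else some dr

def dicoteur (liste_met : List String) (liste_sc : List String) :
    (List (String × String)) × List String :=
  match liste_met.foldl (stepA liste_sc) (some (PySem.Dict.empty, liste_met)) with
  | some dr => (dr.1.items, dr.2)
  | none => ([], [])   -- unreachable under Pre_: Python raises ValueError here

-- ===== PORT B =====
-- sc_by_prefix = {s[:-3]: s for s in liste_sc}
def scIndex (liste_sc : List String) : PySem.Dict String String :=
  liste_sc.foldl (fun d s => d.insert (pvPref s) s) PySem.Dict.empty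

-- one iteration of B's single pass
def stepB (scBy : PySem.Dict String String) (st : PySem.Dict String String × List String)
    (el : String) : PySem.Dict String String × List String :=
  if pvCondTop el then (st.1.insert el el, st.2)
  else if pvCondJ el then
    match scBy.get? (pvPref el) with
    | some m => (st.1.insert el m, st.2)
    | none => (st.1, st.2 ++ [el])
  else if pvCondSea el then (st.1.insert el (pvSeaVal el), st.2)
  else if pvCondE el then (st.1.insert el "ENSO_amplitude", st.2)
  else (st.1, st.2 ++ [el])

def dicoteur_alt (liste_met : List String) (liste_sc : List String) :
    (List (String × String)) × List String :=
  let res := liste_met.foldl (stepB (scIndex liste_sc)) (PySem.Dict.empty, [])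
  (res.1.items, res.2)

-- ===== PRECONDITION & SPEC =====
-- Pre_ excludes exactly the inputs on which A raises ValueError: a JAS/JFM-suffixed metric
-- (not caught by the first branch) whose prefix matches two or more elements of liste_sc
-- makes A call liste_reste.remove more often than copies of that metric exist.
def Pre_dicoteur (liste_met : List String) (liste_sc : List String) : Prop :=
  ∀ el ∈ liste_met, pvCondTop el = false → pvCondJ el = true →
    liste_sc.countP (fun s => pvPref s == pvPref el) ≤ 1
instance (liste_met : List String) (liste_sc : List String) : Decidable (Pre_dicoteur liste_met liste_sc) := by
  unfold Pre_dicoteur; infer_instance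
def pvWitness_dicoteur : List String × List String :=
  (["fooJAS", "xANM", "plain", "yseacycle"], ["fooabc", "barxyz"])

def Spec_dicoteur (liste_met : List String) (liste_sc : List String)
    (out : (List (String × String)) × List String) : Prop := out = dicoteur_alt liste_met liste_sc
instance (liste_met : List String) (liste_sc : List String) (out : (List (String × String)) × List String) :
    Decidable (Spec_dicoteur liste_met liste_sc out) := by unfold Spec_dicoteur; infer_instance

-- ===== CLAIM (what is proved, stated in full; the proofs are below) =====
def Claim_equal_dicoteur : Prop := ∀ (liste_met : List String) (liste_sc : List String),
  Dom_dicoteur liste_met liste_sc → Pre_dicoteur liste_met liste_sc →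
    Spec_dicoteur liste_met liste_sc (dicoteur liste_met liste_sc)
-- ===== LEMMAS AND PROOFS =====

-- whether B's pass keeps el in reste (A's liste_reste keeps exactly these values)
def keepB (scBy : PySem.Dict String String) (el : String) : Bool :=
  if pvCondTop el then false
  else if pvCondJ el then (scBy.get? (pvPref el)).isNone
  else if pvCondSea el then false
  else if pvCondE el then false
  else true

theorem remove?_append_not_mem {el : String} (kept rest : List String) (h : el ∉ kept) :
    PySem.List.remove? (kept ++ el :: rest) el = some (kept ++ rest) := by
  induction kept with
  | nil => simp
  | cons x xs ih =>
      have hx : x ≠ el := fun he => h (he ▸ List.mem_cons_self)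
      have hxs : el ∉ xs := fun hm => h (List.mem_cons_of_mem _ hm)
      rw [List.cons_append, PySem.List.remove?_cons_of_ne _ hx, ih hxs]
      rfl

theorem scfold_no_match (k : String) :
    ∀ (sc : List String) (d : PySem.Dict String String),
      (∀ s ∈ sc, (pvPref s == k) = false) →
      (sc.foldl (fun d s => d.insert (pvPref s) s) d).get? k = d.get? k := by
  intro sc
  induction sc with
  | nil => intro d _; rfl
  | cons s ss ih =>
      intro d h
      have hs : k ≠ pvPref s := by
        intro he; have := h s List.mem_cons_self; simp [he] at this
      rw [List.foldl_cons, ih _ (fun x hx => h x (List.mem_cons_of_mem _ hx)),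
        PySem.Dict.get?_insert_of_ne _ _ hs]

theorem scIndex_get?_aux (k : String) :
    ∀ (sc : List String) (d : PySem.Dict String String),
      sc.countP (fun s => pvPref s == k) ≤ 1 →
      (sc.foldl (fun d s => d.insert (pvPref s) s) d).get? k =
        (match sc.find? (fun s => pvPref s == k) with
         | some s => some s
         | none => d.get? k) := by
  intro sc
  induction sc with
  | nil => intro d _; rfl
  | cons s ss ih =>
      intro d hcount
      by_cases hps : (pvPref s == k) = true
      · have hzero : ss.countP (fun s => pvPref s == k) = 0 := by
          rw [List.countP_cons_of_pos (p := fun s => pvPref s == k) (a := s) hps] at hcount; omega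
        have hnone : ∀ s' ∈ ss, (pvPref s' == k) = false := by
          intro s' hs'
          simpa using List.countP_eq_zero.mp hzero s' hs'
        have hk : pvPref s = k := by simpa using hps
        rw [List.foldl_cons, scfold_no_match k ss _ hnone, hk,
          PySem.Dict.get?_insert_self]
        simp [hps]
      · have hps' : (pvPref s == k) = false := by simpa using hps
        have hk : k ≠ pvPref s := by
          intro he; simp [he] at hps'
        have hcnt : ss.countP (fun s => pvPref s == k) ≤ 1 := by
          rw [List.countP_cons_of_neg (p := fun s => pvPref s == k) (a := s) hps] at hcount; exact hcount
        rw [List.foldl_cons, ih _ hcnt]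
        cases hf : ss.find? (fun s => pvPref s == k) with
        | some s0 => simp [hps', hf]
        | none =>
            simp [hps', hf, PySem.Dict.get?_insert_of_ne _ _ hk]

theorem innerA_no_match (el : String) (st : Option (PySem.Dict String String × List String)) :
    ∀ (sc : List String), (∀ s ∈ sc, (pvPref s == pvPref el) = false) →
      sc.foldl (stepA_inner el) st = st := by
  intro sc
  induction sc generalizing st with
  | nil => intro _; rfl
  | cons s ss ih =>
      intro h
      have hs := h s List.mem_cons_self
      have hst : stepA_inner el st s = st := by
        cases st with
        | none => rfl
        | some dr => simp [stepA_inner, hs]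
      rw [List.foldl_cons, hst]
      exact ih _ (fun x hx => h x (List.mem_cons_of_mem _ hx))

theorem innerA_characterize (el : String) (kept rest : List String) (h : el ∉ kept) :
    ∀ (sc : List String) (d : PySem.Dict String String),
      sc.countP (fun s => pvPref s == pvPref el) ≤ 1 →
      sc.foldl (stepA_inner el) (some (d, kept ++ el :: rest)) =
        (match sc.find? (fun s => pvPref s == pvPref el) with
         | some s => some (d.insert el s, kept ++ rest)
         | none => some (d, kept ++ el :: rest)) := by
  intro sc
  induction sc with
  | nil => intro d _; rfl
  | cons s ss ih =>
      intro d hcount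
      by_cases hps : (pvPref s == pvPref el) = true
      · have hzero : ss.countP (fun s => pvPref s == pvPref el) = 0 := by
          rw [List.countP_cons_of_pos (p := fun s => pvPref s == pvPref el) (a := s) hps] at hcount; omega
        have hnone : ∀ s' ∈ ss, (pvPref s' == pvPref el) = false := by
          intro s' hs'
          simpa using List.countP_eq_zero.mp hzero s' hs'
        rw [List.foldl_cons]
        have hstep : stepA_inner el (some (d, kept ++ el :: rest)) s =
            some (d.insert el s, kept ++ rest) := by
          simp [stepA_inner, hps, remove?_append_not_mem kept rest h]
        rw [hstep, innerA_no_match el _ ss hnone]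
        simp [hps]
      · have hps' : (pvPref s == pvPref el) = false := by simpa using hps
        have hcnt : ss.countP (fun s => pvPref s == pvPref el) ≤ 1 := by
          rw [List.countP_cons_of_neg (p := fun s => pvPref s == pvPref el) (a := s) hps] at hcount; exact hcount
        have hstep : stepA_inner el (some (d, kept ++ el :: rest)) s =
            some (d, kept ++ el :: rest) := by
          simp [stepA_inner, hps']
        rw [List.foldl_cons, hstep, ih _ hcnt]
        simp [hps']

theorem main_invariant (liste_sc : List String) :
    ∀ (rest : List String) (d : PySem.Dict String String) (kept : List String),
      (∀ el ∈ rest, pvCondTop el = false → pvCondJ el = true →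
        liste_sc.countP (fun s => pvPref s == pvPref el) ≤ 1) →
      (∀ x ∈ kept, keepB (scIndex liste_sc) x = true) →
      rest.foldl (stepA liste_sc) (some (d, kept ++ rest)) =
        some (rest.foldl (stepB (scIndex liste_sc)) (d, kept)) := by
  intro rest
  induction rest with
  | nil => intro d kept _ _; simp
  | cons el rest ih =>
      intro d kept hpre hkept
      have hpre' : ∀ e ∈ rest, pvCondTop e = false → pvCondJ e = true →
          liste_sc.countP (fun s => pvPref s == pvPref e) ≤ 1 :=
        fun e he => hpre e (List.mem_cons_of_mem _ he)
      rw [List.foldl_cons, List.foldl_cons]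
      by_cases h1 : pvCondTop el = true
      · have hnot : el ∉ kept := by
          intro hm; have := hkept el hm; simp [keepB, h1] at this
        have hA : stepA liste_sc (some (d, kept ++ el :: rest)) el =
            some (d.insert el el, kept ++ rest) := by
          simp [stepA, h1, remove?_append_not_mem kept rest hnot]
        have hB : stepB (scIndex liste_sc) (d, kept) el = (d.insert el el, kept) := by
          simp [stepB, h1]
        rw [hA, hB]
        exact ih _ _ hpre' hkept
      · have h1' : pvCondTop el = false := by simpa using h1
        by_cases h2 : pvCondJ el = true
        · have hcnt := hpre el List.mem_cons_self h1' h2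
          have hget : (scIndex liste_sc).get? (pvPref el) =
              (match liste_sc.find? (fun s => pvPref s == pvPref el) with
               | some s => some s
               | none => none) := by
            rw [scIndex, scIndex_get?_aux (pvPref el) liste_sc _ hcnt]
            cases liste_sc.find? (fun s => pvPref s == pvPref el) <;> rfl
          cases hf : liste_sc.find? (fun s => pvPref s == pvPref el) with
          | some s0 =>
              have hg : (scIndex liste_sc).get? (pvPref el) = some s0 := by
                rw [hget, hf]
              have hnot : el ∉ kept := by
                intro hm; have := hkept el hm; simp [keepB, h1', h2, hg] at this
              have hA : stepA liste_sc (some (d, kept ++ el :: rest)) el =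
                  some (d.insert el s0, kept ++ rest) := by
                simp only [stepA, Option.bind_some, h1', h2, Bool.false_eq_true,
                  if_false, if_true]
                rw [innerA_characterize el kept rest hnot liste_sc d hcnt, hf]
              have hB : stepB (scIndex liste_sc) (d, kept) el =
                  (d.insert el s0, kept) := by
                simp [stepB, h1', h2, hg]
              rw [hA, hB]
              exact ih _ _ hpre' hkept
          | none =>
              have hg : (scIndex liste_sc).get? (pvPref el) = none := by
                rw [hget, hf]
              have hnone : ∀ s ∈ liste_sc, (pvPref s == pvPref el) = false := by
                intro s hs
                have := List.find?_eq_none.mp hf s hs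
                simpa using this
              have hA : stepA liste_sc (some (d, kept ++ el :: rest)) el =
                  some (d, kept ++ el :: rest) := by
                simp only [stepA, Option.bind_some, h1', h2, Bool.false_eq_true,
                  if_false, if_true]
                exact innerA_no_match el _ liste_sc hnone
              have hB : stepB (scIndex liste_sc) (d, kept) el = (d, kept ++ [el]) := by
                simp [stepB, h1', h2, hg]
              rw [hA, hB]
              have hkept' : ∀ x ∈ kept ++ [el], keepB (scIndex liste_sc) x = true := by
                intro x hx
                rcases List.mem_append.mp hx with hx | hx
                · exact hkept x hx
                · have : x = el := by simpa using hx
                  subst this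
                  simp [keepB, h1', h2, hg]
              have := ih d (kept ++ [el]) hpre' hkept'
              simpa [List.append_assoc] using this
        · have h2' : pvCondJ el = false := by simpa using h2
          by_cases h3 : pvCondSea el = true
          · have hnot : el ∉ kept := by
              intro hm; have := hkept el hm; simp [keepB, h1', h2', h3] at this
            have hA : stepA liste_sc (some (d, kept ++ el :: rest)) el =
                some (d.insert el (pvSeaVal el), kept ++ rest) := by
              simp [stepA, h1', h2', h3, remove?_append_not_mem kept rest hnot]
            have hB : stepB (scIndex liste_sc) (d, kept) el =
                (d.insert el (pvSeaVal el), kept) := by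
              simp [stepB, h1', h2', h3]
            rw [hA, hB]
            exact ih _ _ hpre' hkept
          · have h3' : pvCondSea el = false := by simpa using h3
            by_cases h4 : pvCondE el = true
            · have hnot : el ∉ kept := by
                intro hm; have := hkept el hm; simp [keepB, h1', h2', h3', h4] at this
              have hA : stepA liste_sc (some (d, kept ++ el :: rest)) el =
                  some (d.insert el "ENSO_amplitude", kept ++ rest) := by
                simp [stepA, h1', h2', h3', h4, remove?_append_not_mem kept rest hnot]
              have hB : stepB (scIndex liste_sc) (d, kept) el =
                  (d.insert el "ENSO_amplitude", kept) := by
                simp [stepB, h1', h2', h3', h4]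
              rw [hA, hB]
              exact ih _ _ hpre' hkept
            · have h4' : pvCondE el = false := by simpa using h4
              have hA : stepA liste_sc (some (d, kept ++ el :: rest)) el =
                  some (d, kept ++ el :: rest) := by
                simp [stepA, h1', h2', h3', h4']
              have hB : stepB (scIndex liste_sc) (d, kept) el = (d, kept ++ [el]) := by
                simp [stepB, h1', h2', h3', h4']
              rw [hA, hB]
              have hkept' : ∀ x ∈ kept ++ [el], keepB (scIndex liste_sc) x = true := by
                intro x hx
                rcases List.mem_append.mp hx with hx | hx
                · exact hkept x hx
                · have : x = el := by simpa using hx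
                  subst this
                  simp [keepB, h1', h2', h3', h4']
              have := ih d (kept ++ [el]) hpre' hkept'
              simpa [List.append_assoc] using this

-- ===== VERDICT (by name: the statement is the Claim_ definition above) =====
theorem dicoteur_spec : Claim_equal_dicoteur := by
  intro liste_met liste_sc _ hpre
  unfold Spec_dicoteur dicoteur dicoteur_alt
  have h := main_invariant liste_sc liste_met PySem.Dict.empty [] hpre (by simp)
  simp only [List.nil_append] at h
  rw [h]
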